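-- pv_equiv track=rewrite | github.com/rertyy/aoc2023 | d06/6-2.py | find_max_winning
-- ===== SOURCE A (Python) =====
-- def find_max_winning(race_time: int, dist_to_beat: int) -> int:
--     lo = 1
--     hi = race_time - 1
--
--     while lo < hi:
--         m = lo + (hi - lo) // 2
--         if is_winning_dist(m, race_time, dist_to_beat):
--             lo = m + 1
--         else:
--             hi = m
--     return lo - 1
--
-- def is_winning_dist(time_held: int, race_time: int, dist_to_beat: int) -> int:
--     time_travelled = race_time - time_held
--     speed = time_held
--     distance_travelled = speed * time_travelled
--     return distance_travelled > dist_to_beat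
-- ===== SOURCE B (Python) =====
-- def find_max_winning(race_time: int, dist_to_beat: int) -> int:
--     m = race_time - 2
--     while m >= 1:
--         if m * (race_time - m) > dist_to_beat:
--             return m
--         m -= 1
--     return 0
-- ===== Notes on version B (the rewrite author's own statement) =====
-- stated objective: simpler
-- what changed: Replaces the binary search (with its separate is_winning_dist helper) by a single downward linear scan from race_time-2 that returns the first winning hold time, defaulting to 0.
import Mathlib
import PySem

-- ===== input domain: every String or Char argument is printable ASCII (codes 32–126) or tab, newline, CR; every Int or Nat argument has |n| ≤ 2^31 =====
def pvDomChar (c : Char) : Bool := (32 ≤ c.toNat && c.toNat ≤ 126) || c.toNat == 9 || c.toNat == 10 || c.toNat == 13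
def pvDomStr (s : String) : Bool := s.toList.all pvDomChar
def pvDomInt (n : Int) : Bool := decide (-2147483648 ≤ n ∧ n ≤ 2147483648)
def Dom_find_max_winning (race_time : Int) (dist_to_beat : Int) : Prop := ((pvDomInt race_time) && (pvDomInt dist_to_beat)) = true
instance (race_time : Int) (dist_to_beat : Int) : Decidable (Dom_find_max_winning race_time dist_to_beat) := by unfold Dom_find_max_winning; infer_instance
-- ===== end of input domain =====

-- B replaces A's binary search by a plain downward linear scan (simpler, not faster).

-- ===== PORT A =====
def is_winning_dist (time_held : Int) (race_time : Int) (dist_to_beat : Int) : Bool :=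
  let time_travelled := race_time - time_held
  let speed := time_held
  let distance_travelled := speed * time_travelled
  distance_travelled > dist_to_beat

-- the 'while lo < hi' loop of A; fuel ≥ hi - lo (the gap shrinks by ≥ 1 each turn), so the
-- fuel-0 arm is never reached from find_max_winning's call
def loopA (race_time : Int) (dist_to_beat : Int) : Nat → Int → Int → Int
  | 0, lo, _hi => lo - 1
  | fuel + 1, lo, hi =>
    if lo < hi then
      let m := lo + PySem.Int.floordiv (hi - lo) 2
      if is_winning_dist m race_time dist_to_beat then
        loopA race_time dist_to_beat fuel (m + 1) hi
      else
        loopA race_time dist_to_beat fuel lo m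
    else lo - 1

def find_max_winning (race_time : Int) (dist_to_beat : Int) : Int :=
  loopA race_time dist_to_beat (race_time - 1 - 1).toNat 1 (race_time - 1)

-- ===== PORT B =====
-- the 'while m >= 1' loop of B; fuel ≥ m, so the fuel-0 arm is never reached from
-- find_max_winning_alt's call
def scanB (race_time : Int) (dist_to_beat : Int) : Nat → Int → Int
  | 0, _m => 0
  | fuel + 1, m =>
    if 1 ≤ m then
      if m * (race_time - m) > dist_to_beat then m
      else scanB race_time dist_to_beat fuel (m - 1)
    else 0

def find_max_winning_alt (race_time : Int) (dist_to_beat : Int) : Int :=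
  scanB race_time dist_to_beat (race_time - 2).toNat (race_time - 2)

-- ===== PRECONDITION & SPEC =====
def Spec_find_max_winning (race_time : Int) (dist_to_beat : Int) (out : Int) : Prop := out = find_max_winning_alt race_time dist_to_beat
instance (race_time : Int) (dist_to_beat : Int) (out : Int) : Decidable (Spec_find_max_winning race_time dist_to_beat out) := by unfold Spec_find_max_winning; infer_instance

-- ===== CLAIM (what is proved, stated in full; the proofs are below) =====
def Claim_equal_find_max_winning : Prop := ∀ (race_time : Int) (dist_to_beat : Int), Dom_find_max_winning race_time dist_to_beat → Spec_find_max_winning race_time dist_to_beat (find_max_winning race_time dist_to_beat)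

-- ===== LEMMAS AND PROOFS =====

-- concavity of k ↦ k*(rt-k): on [a,b] the value at m is above one of the endpoints
lemma conc (rt a b m : Int) (ha : a ≤ m) (hb : m ≤ b) :
    a * (rt - a) ≤ m * (rt - m) ∨ b * (rt - b) ≤ m * (rt - m) := by
  rcases le_or_gt (2 * m) rt with h | h
  · left; nlinarith
  · right; nlinarith

-- m0 = 1 + (rt-2)//2 is the integer peak of k ↦ k*(rt-k)
lemma peak (rt k m0 : Int) (hm : m0 = 1 + PySem.Int.floordiv (rt - 2) 2) :
    k * (rt - k) ≤ m0 * (rt - m0) := by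
  rw [PySem.Int.floordiv_eq_ediv_of_pos (by norm_num)] at hm
  have h : 2 * m0 = rt ∨ 2 * m0 = rt - 1 := by omega
  rcases h with h | h
  · have hrt : rt = 2 * m0 := by omega
    subst hrt
    nlinarith [sq_nonneg (m0 - k)]
  · have hrt : rt = 2 * m0 + 1 := by omega
    subst hrt
    have hcons : 0 ≤ (m0 - k) * (m0 - k + 1) := by
      rcases le_or_gt k m0 with hk | hk
      · exact mul_nonneg (by omega) (by omega)
      · calc (0:Int) ≤ (k - m0) * (k - m0 - 1) := mul_nonneg (by omega) (by omega)
          _ = (m0 - k) * (m0 - k + 1) := by ring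
    nlinarith [hcons]

-- scanB returns 0 when nothing in [1, M] wins
lemma scanB_none : ∀ (n : Nat) (rt d M : Int), M ≤ (n : Int) →
    (∀ k, 1 ≤ k → k ≤ M → ¬ d < k * (rt - k)) → scanB rt d n M = 0 := by
  intro n
  induction n with
  | zero => intro rt d M _ _; rfl
  | succ n ih =>
    intro rt d M hM hall
    rw [scanB]
    split_ifs with h1 h2
    · exact absurd h2 (hall M h1 le_rfl)
    · exact ih rt d (M - 1) (by push_cast at hM ⊢; omega)
        (fun k hk1 hk2 => hall k hk1 (by omega))
    · rfl

-- scanB returns r when r wins and nothing in (r, M] wins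
lemma scanB_found : ∀ (n : Nat) (rt d M r : Int), M ≤ (n : Int) →
    1 ≤ r → r ≤ M → d < r * (rt - r) →
    (∀ k, r < k → k ≤ M → ¬ d < k * (rt - k)) → scanB rt d n M = r := by
  intro n
  induction n with
  | zero =>
    intro rt d M r hM hr1 hr2 _ _
    simp only [Nat.cast_zero] at hM; omega
  | succ n ih =>
    intro rt d M r hM hr1 hr2 hwin hall
    rw [scanB]
    rw [if_pos (by omega)]
    by_cases h2 : d < M * (rt - M)
    · rw [if_pos h2]
      by_contra hne
      exact hall M (by omega) le_rfl h2
    · rw [if_neg h2]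
      have hrM : r < M := by
        rcases eq_or_lt_of_le hr2 with h | h
        · exact absurd (h ▸ hwin) h2
        · exact h
      exact ih rt d (M - 1) r (by push_cast at hM ⊢; omega) hr1 (by omega) hwin
        (fun k hk1 hk2 => hall k hk1 (by omega))

lemma is_winning_iff (m rt d : Int) : is_winning_dist m rt d = true ↔ d < m * (rt - m) := by
  simp [is_winning_dist]

-- the value A's loop returns once lo = hi, expressed as B's scan result
lemma terminal (rt d lo : Int) (h1 : 1 ≤ lo) (h3 : lo ≤ rt - 1)
    (hA2 : lo = 1 ∨ d < (lo - 1) * (rt - (lo - 1)))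
    (hA3 : ∀ k, lo ≤ k → k ≤ rt - 2 → ¬ d < k * (rt - k))
    (hA4 : lo = 1 → (lo = rt - 1 ∨ ∀ k, 1 ≤ k → k ≤ rt - 2 → ¬ d < k * (rt - k))) :
    lo - 1 = scanB rt d (rt - 2).toNat (rt - 2) := by
  rcases hA2 with hlo1 | hwin
  · subst hlo1
    rcases hA4 rfl with hhi | hnone
    · -- rt = 2 : the scan range is empty
      rw [scanB_none ((rt - 2).toNat) rt d (rt - 2) (Int.self_le_toNat _)
        (fun k hk1 hk2 => by omega)]
      omega
    · rw [scanB_none ((rt - 2).toNat) rt d (rt - 2) (Int.self_le_toNat _) hnone]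
      omega
  · by_cases hlo1 : lo = 1
    · subst hlo1
      rcases hA4 rfl with hhi | hnone
      · rw [scanB_none ((rt - 2).toNat) rt d (rt - 2) (Int.self_le_toNat _)
          (fun k hk1 hk2 => by omega)]
        omega
      · rw [scanB_none ((rt - 2).toNat) rt d (rt - 2) (Int.self_le_toNat _) hnone]
        omega
    · rw [scanB_found ((rt - 2).toNat) rt d (rt - 2) (lo - 1) (Int.self_le_toNat _)
        (by omega) (by omega) hwin
        (fun k hk1 hk2 => hA3 k (by omega) hk2)]

-- loop invariant of A's binary search: it computes B's scan result
lemma loopA_inv : ∀ (n : Nat) (rt d lo hi : Int), hi - lo ≤ (n : Int) →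
    1 ≤ lo → lo ≤ hi → hi ≤ rt - 1 →
    (lo = 1 ∨ d < (lo - 1) * (rt - (lo - 1))) →
    (∀ k, hi ≤ k → k ≤ rt - 2 → ¬ d < k * (rt - k)) →
    (lo = 1 → (hi = rt - 1 ∨ ∀ k, 1 ≤ k → k ≤ rt - 2 → ¬ d < k * (rt - k))) →
    loopA rt d n lo hi = scanB rt d (rt - 2).toNat (rt - 2) := by
  intro n
  induction n with
  | zero =>
    intro rt d lo hi hfuel h1 h2 h3 hA2 hA3 hA4
    have hlohi : lo = hi := by simp only [Nat.cast_zero] at hfuel; omega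
    subst hlohi
    exact terminal rt d lo h1 h3 hA2 hA3 hA4
  | succ n ih =>
    intro rt d lo hi hfuel h1 h2 h3 hA2 hA3 hA4
    by_cases hlt : lo < hi
    · rw [loopA, if_pos hlt]
      have hfd : PySem.Int.floordiv (hi - lo) 2 = (hi - lo) / 2 :=
        PySem.Int.floordiv_eq_ediv_of_pos (by norm_num)
      set m := lo + PySem.Int.floordiv (hi - lo) 2 with hmdef
      have hm_lo : lo ≤ m := by rw [hmdef, hfd]; omega
      have hm_hi : m < hi := by rw [hmdef, hfd]; omega
      push_cast at hfuel
      by_cases hw : d < m * (rt - m)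
      · rw [if_pos ((is_winning_iff m rt d).mpr hw)]
        exact ih rt d (m + 1) hi (by omega) (by omega) (by omega) h3
          (Or.inr (by simpa using hw)) hA3 (by omega)
      · rw [if_neg (by simp [is_winning_iff, hw])]
        -- hi := m ; show everything in [m, rt-2] loses
        have hA3' : ∀ k, m ≤ k → k ≤ rt - 2 → ¬ d < k * (rt - k) := by
          rcases hA2 with hlo1 | hwinlo
          · rcases hA4 hlo1 with hhirt | hnone
            · -- hi = rt-1: m is the integer peak of the parabola
              intro k hk1 hk2 hkw
              have hpk : k * (rt - k) ≤ m * (rt - m) := by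
                apply peak rt k m
                rw [hmdef, hlo1, hhirt]
                ring_nf
              omega
            · exact fun k hk1 hk2 => hnone k (by omega) hk2
          · -- lo ≥ 2: lo-1 wins, so a winner above m would force m to win (concavity)
            intro k hk1 hk2 hkw
            rcases eq_or_lt_of_le hk1 with hkm | hkm
            · exact hw (hkm ▸ hkw)
            · rcases lt_or_ge k hi with hkhi | hkhi
              · rcases conc rt (lo - 1) k m (by omega) (by omega) with hc | hc
                · omega
                · omega
              · exact hA3 k hkhi hk2 hkw
        exact ih rt d lo m (by omega) h1 (by omega) (by omega) hA2 hA3'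
          (fun hlo1 => Or.inr (by
            intro k hk1 hk2
            rcases hA4 hlo1 with hhirt | hnone
            · intro hkw
              have hpk : k * (rt - k) ≤ m * (rt - m) := by
                apply peak rt k m
                rw [hmdef, hlo1, hhirt]
                ring_nf
              omega
            · exact hnone k hk1 hk2))
    · rw [loopA, if_neg hlt]
      have hlohi : lo = hi := by omega
      subst hlohi
      exact terminal rt d lo h1 h3 hA2 hA3 hA4

-- ===== VERDICT (by name: the statement is the Claim_ definition above) =====
theorem find_max_winning_spec : Claim_equal_find_max_winning := by
  intro rt d _
  unfold Spec_find_max_winning find_max_winning find_max_winning_alt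
  by_cases h : 1 < rt - 1
  · exact loopA_inv ((rt - 1 - 1).toNat) rt d 1 (rt - 1) (Int.self_le_toNat _) le_rfl
      (by omega) le_rfl (Or.inl rfl) (fun k hk1 hk2 => by omega) (fun _ => Or.inl rfl)
  · have h0 : (rt - 1 - 1).toNat = 0 := by omega
    rw [h0, loopA]
    rw [scanB_none ((rt - 2).toNat) rt d (rt - 2) (Int.self_le_toNat _)
      (fun k hk1 hk2 => by omega)]
    omega
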